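-- pv_equiv track=rewrite | github.com/JosephS1618/word-miner-python | wordMiner/code.py | hash_generator
-- ===== SOURCE A (Python) =====
-- def hash_generator(word): # generates hash code
--     hash = 0
--     x = 0
--
--     for i in word:
--         hash += ord(i) * (x+1)
--         x+=1
--
--     hash %= 20000
--
--     return hash
-- ===== SOURCE B (Python) =====
-- def hash_generator(word): # generates hash code
--     # staged decomposition: the weighted sum sum((i+1)*ord(c)) equals the
--     # sum of all suffix char-code sums, computed by precomputing the total
--     # and subtracting as we advance (no multiplication, no position counter)
--     codes = [ord(c) for c in word]
--     s = sum(codes)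
--     total = 0
--     for v in codes:
--         total += s
--         s -= v
--     return total % 20000
-- ===== Notes on version B (the rewrite author's own statement) =====
-- stated objective: alternative
-- what changed: Replaces the positional multiply-and-accumulate with a two-stage suffix-sum decomposition: precompute the total char-code sum once, then accumulate the shrinking suffix sums (total += s; s -= ord(c)), multiplication-free.
import Mathlib
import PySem

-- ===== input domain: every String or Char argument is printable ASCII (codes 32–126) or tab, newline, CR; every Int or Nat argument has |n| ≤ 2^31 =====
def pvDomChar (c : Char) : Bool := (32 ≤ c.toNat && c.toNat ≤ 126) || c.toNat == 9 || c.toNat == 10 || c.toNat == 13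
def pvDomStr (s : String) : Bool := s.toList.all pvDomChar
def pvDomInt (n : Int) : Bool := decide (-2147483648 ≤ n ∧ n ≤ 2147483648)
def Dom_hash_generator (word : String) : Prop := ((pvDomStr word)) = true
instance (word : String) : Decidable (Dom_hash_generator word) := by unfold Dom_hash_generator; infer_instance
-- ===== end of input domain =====

-- B replaces A's positional multiply-and-accumulate with a two-stage suffix-sum
-- decomposition (precompute the total code sum, then subtract as it advances);
-- objective: alternative.

-- ===== PORT A =====
-- for i in word: hash += ord(i) * (x+1); x += 1
def hashStepA (s : Int × Int) (c : Char) : Int × Int :=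
  (s.1 + (c.toNat : Int) * (s.2 + 1), s.2 + 1)

def hash_generator (word : String) : Int :=
  PySem.Int.mod (word.toList.foldl hashStepA (0, 0)).1 20000

-- ===== PORT B =====
-- codes = [ord(c) for c in word]; s = sum(codes); for v in codes: total += s; s -= v
def hashStepB (st : Int × Int) (v : Int) : Int × Int :=
  (st.1 + st.2, st.2 - v)

def hash_generator_alt (word : String) : Int :=
  let codes : List Int := word.toList.map (fun c => (c.toNat : Int))
  PySem.Int.mod (codes.foldl hashStepB (0, codes.sum)).1 20000

-- ===== PRECONDITION & SPEC =====
def Spec_hash_generator (word : String) (out : Int) : Prop := out = hash_generator_alt word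
instance (word : String) (out : Int) : Decidable (Spec_hash_generator word out) := by unfold Spec_hash_generator; infer_instance

-- ===== CLAIM (what is proved, stated in full; the proofs are below) =====
def Claim_equal_hash_generator : Prop := ∀ (word : String), Dom_hash_generator word → Spec_hash_generator word (hash_generator word)

-- ===== LEMMAS AND PROOFS =====

-- weighted sum as A computes it from position offset x
def wsum (l : List Char) (x : Int) : Int :=
  match l with
  | [] => 0
  | c :: l => (c.toNat : Int) * (x + 1) + wsum l (x + 1)

-- value B's loop accumulates over a code list starting with suffix accumulator s
def bval (m : List Int) (s : Int) : Int :=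
  match m with
  | [] => 0
  | v :: m => s + bval m (s - v)

theorem foldlA_fst (l : List Char) (h x : Int) :
    (l.foldl hashStepA (h, x)).1 = h + wsum l x := by
  induction l generalizing h x with
  | nil => simp [wsum]
  | cons c l ih => simp [List.foldl, hashStepA, wsum, ih]; ring

theorem foldlB_fst (m : List Int) (t s : Int) :
    (m.foldl hashStepB (t, s)).1 = t + bval m s := by
  induction m generalizing t s with
  | nil => simp [bval]
  | cons v m ih => simp [List.foldl, hashStepB, ih, bval]; ring

theorem wsum_shift (l : List Char) (x : Int) :
    wsum l x = wsum l 0 + x * (l.map (fun c => (c.toNat : Int))).sum := by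
  induction l generalizing x with
  | nil => simp [wsum]
  | cons c l ih =>
    simp only [wsum, List.map_cons, List.sum_cons]
    rw [ih (x + 1), ih (0 + 1)]
    ring

theorem bval_eq (l : List Char) (s : Int) :
    bval (l.map (fun c => (c.toNat : Int))) s
      = wsum l 0 + (s - (l.map (fun c => (c.toNat : Int))).sum) * l.length := by
  induction l generalizing s with
  | nil => simp [bval, wsum]
  | cons c l ih =>
    simp only [List.map_cons, bval, List.sum_cons, List.length_cons, wsum, ih]
    rw [wsum_shift l (0 + 1)]
    push_cast
    ring

-- ===== VERDICT (by name: the statement is the Claim_ definition above) =====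
theorem hash_generator_spec : Claim_equal_hash_generator := by
  intro word _
  unfold Spec_hash_generator hash_generator hash_generator_alt
  simp only [foldlA_fst, foldlB_fst, bval_eq]
  ring_nf
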